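-- pv_equiv track=rewrite | github.com/opti-intel/benwa-intelligence | services/ingestion-gateway/app/pdf_parser.py | _build_location_mapping
-- ===== SOURCE A (Python) =====
-- from typing import Optional
--
-- def _build_location_mapping(
--     rows: list[list[str]],
--     street_row_idx: Optional[int],
--     house_row_idx: Optional[int],
-- ) -> dict[int, str]:
--     """Build a mapping of column index → street name only.
--
--     House numbers come from the cell values in activity rows, not from
--     the header. The header house-number row is ignored here because the
--     cell value in each activity row already tells us which house is being
--     worked on.
--     """
--     col_locations: dict[int, str] = {}
--
--     if street_row_idx is not None:
--         street_row = rows[street_row_idx]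
--         current_street = ""
--         for col_idx, cell in enumerate(street_row):
--             if cell.strip():
--                 current_street = cell.strip()
--             if current_street:
--                 col_locations[col_idx] = current_street
--
--     return col_locations
-- ===== SOURCE B (Python) =====
-- from typing import Optional
--
-- def _build_location_mapping(
--     rows: list[list[str]],
--     street_row_idx: Optional[int],
--     house_row_idx: Optional[int],
-- ) -> dict[int, str]:
--     """Anchor-based forward fill: collect the non-blank street cells as
--     (column, name) anchors, then fill each anchor's name over the column
--     span up to the next anchor (the last anchor runs to the end of the row)."""
--     col_locations: dict[int, str] = {}
--     if street_row_idx is None: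
--         return col_locations
--     street_row = rows[street_row_idx]
--     anchors = [(i, cell.strip()) for i, cell in enumerate(street_row) if cell.strip()]
--     bounds = [i for i, _ in anchors[1:]] + [len(street_row)]
--     for (start, name), stop in zip(anchors, bounds):
--         for j in range(start, stop):
--             col_locations[j] = name
--     return col_locations
-- ===== Notes on version B (the rewrite author's own statement) =====
-- stated objective: alternative
-- what changed: Replaces A's cell-by-cell forward-fill state machine (carrying current_street through every column) by an anchor decomposition: collect the non-blank cells as (column, name) anchors, then fill each anchor's name over the whole column span up to the next anchor (the last one to the end of the row).
import Mathlib
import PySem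

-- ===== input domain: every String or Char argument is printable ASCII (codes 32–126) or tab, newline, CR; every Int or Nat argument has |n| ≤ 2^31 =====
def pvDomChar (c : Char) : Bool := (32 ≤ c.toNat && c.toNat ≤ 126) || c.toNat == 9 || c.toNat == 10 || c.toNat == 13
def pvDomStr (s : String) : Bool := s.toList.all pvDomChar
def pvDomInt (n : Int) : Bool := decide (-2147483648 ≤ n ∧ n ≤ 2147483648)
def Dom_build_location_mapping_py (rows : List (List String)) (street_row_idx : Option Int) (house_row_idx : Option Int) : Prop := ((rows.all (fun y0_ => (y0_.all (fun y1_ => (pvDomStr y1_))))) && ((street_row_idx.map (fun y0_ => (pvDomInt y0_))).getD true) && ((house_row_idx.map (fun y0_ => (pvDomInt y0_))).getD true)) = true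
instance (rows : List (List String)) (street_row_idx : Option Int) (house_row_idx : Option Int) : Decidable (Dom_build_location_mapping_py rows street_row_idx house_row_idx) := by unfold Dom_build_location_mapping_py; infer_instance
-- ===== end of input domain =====

-- B replaces A's cell-by-cell forward-fill state machine by an anchor decomposition
-- (collect non-blank cells, then fill whole column spans between consecutive anchors);
-- objective: alternative decomposition, same asymptotic cost.

-- ===== PORT A =====
-- loop body of A's 'for col_idx, cell in enumerate(street_row)': state = (current_street, col_locations)
def pvStepA (st : String × PySem.Dict Int String) (p : Int × String) : String × PySem.Dict Int String :=
  let s := PySem.Str.strip p.2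
  let cur := if s ≠ "" then s else st.1
  (cur, if cur ≠ "" then st.2.insert p.1 cur else st.2)

def build_location_mapping_py (rows : List (List String)) (street_row_idx : Option Int) (house_row_idx : Option Int) : List (Int × String) :=
  match street_row_idx with
  | none => (PySem.Dict.empty : PySem.Dict Int String).items
  | some i =>
    -- rows[street_row_idx]: IndexError (pyGet? = none) is excluded by Pre_
    let street_row := (PySem.List.pyGet? rows i).getD []
    ((PySem.List.enumerate street_row).foldl pvStepA ("", PySem.Dict.empty)).2.items

-- ===== PORT B =====
-- loop body of B's 'for (start, name), stop in zip(anchors, bounds)'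
def pvStepB (d : PySem.Dict Int String) (q : (Int × String) × Int) : PySem.Dict Int String :=
  (PySem.List.pyRange q.1.1 q.2 1).foldl (fun d j => d.insert j q.1.2) d

def build_location_mapping_py_alt (rows : List (List String)) (street_row_idx : Option Int) (house_row_idx : Option Int) : List (Int × String) :=
  match street_row_idx with
  | none => (PySem.Dict.empty : PySem.Dict Int String).items
  | some i =>
    let street_row := (PySem.List.pyGet? rows i).getD []
    let anchors := (PySem.List.enumerate street_row).filterMap
      (fun p => if PySem.Str.strip p.2 ≠ "" then some (p.1, PySem.Str.strip p.2) else none)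
    let bounds := (anchors.drop 1).map (·.1) ++ [(street_row.length : Int)]
    ((anchors.zip bounds).foldl pvStepB PySem.Dict.empty).items

-- ===== PRECONDITION & SPEC =====
-- Pre_ excludes exactly the inputs where A raises IndexError: street_row_idx = some i with i
-- outside the valid (possibly negative) Python index range of rows.
def Pre_build_location_mapping_py (rows : List (List String)) (street_row_idx : Option Int) (house_row_idx : Option Int) : Prop :=
  street_row_idx = none ∨ PySem.Raise.InRange rows.length (street_row_idx.getD 0)
instance (rows : List (List String)) (street_row_idx : Option Int) (house_row_idx : Option Int) : Decidable (Pre_build_location_mapping_py rows street_row_idx house_row_idx) := by unfold Pre_build_location_mapping_py; infer_instance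

def pvWitness_build_location_mapping_py : List (List String) × Option Int × Option Int :=
  ([["Main St", "", " Oak Ave "], ["1", "2", "3"]], some 0, some 1)

def Spec_build_location_mapping_py (rows : List (List String)) (street_row_idx : Option Int) (house_row_idx : Option Int) (out : List (Int × String)) : Prop := out = build_location_mapping_py_alt rows street_row_idx house_row_idx
instance (rows : List (List String)) (street_row_idx : Option Int) (house_row_idx : Option Int) (out : List (Int × String)) : Decidable (Spec_build_location_mapping_py rows street_row_idx house_row_idx out) := by unfold Spec_build_location_mapping_py; infer_instance

-- ===== CLAIM (what is proved, stated in full; the proofs are below) =====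
def Claim_equal_build_location_mapping_py : Prop := ∀ (rows : List (List String)) (street_row_idx : Option Int) (house_row_idx : Option Int), Dom_build_location_mapping_py rows street_row_idx house_row_idx → Pre_build_location_mapping_py rows street_row_idx house_row_idx → Spec_build_location_mapping_py rows street_row_idx house_row_idx (build_location_mapping_py rows street_row_idx house_row_idx)

-- ===== LEMMAS AND PROOFS =====

-- the anchor list of a row, starting at column b (proof-side recursive form of B's comprehension)
def pvAnchorsR : List String → Int → List (Int × String)
  | [], _ => []
  | c :: cs, b =>
    if PySem.Str.strip c ≠ "" then (b, PySem.Str.strip c) :: pvAnchorsR cs (b + 1)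
    else pvAnchorsR cs (b + 1)

-- the stop column of the current anchor: the next anchor's column, or N at the end
def pvStop : List (Int × String) → Int → Int
  | [], n => n
  | q :: _, _ => q.1

-- the common normal form of both results: each anchor filled up to the next anchor / N
def pvFill : List (Int × String) → Int → List (Int × String)
  | [], _ => []
  | (i, s) :: rest, n =>
    (PySem.List.pyRange i (pvStop rest n) 1).map (fun j => (j, s)) ++ pvFill rest n

theorem pvFill_cons (i : Int) (s : String) (rest : List (Int × String)) (n : Int) :
    pvFill ((i, s) :: rest) n
      = (PySem.List.pyRange i (pvStop rest n) 1).map (fun j => (j, s)) ++ pvFill rest n := rfl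

-- a fresh anchor at i with the same name as the current head can absorb one column from the head
theorem pvFill_shift (i : Int) (s : String) (rest : List (Int × String)) (n : Int)
    (h : i < pvStop rest n) :
    pvFill ((i, s) :: rest) n = (i, s) :: pvFill ((i + 1, s) :: rest) n := by
  rw [pvFill_cons, pvFill_cons, PySem.List.pyRange_one_cons h]
  simp

-- two anchors at the same column: the first one's span is empty
theorem pvFill_dup (i : Int) (x s : String) (rest : List (Int × String)) (n : Int) :
    pvFill ((i, x) :: (i, s) :: rest) n = pvFill ((i, s) :: rest) n := by
  rw [pvFill_cons]
  have : pvStop ((i, s) :: rest) n = i := rfl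
  rw [this, PySem.List.pyRange_one_eq_nil (le_refl i)]
  simp

theorem pvAnchors_eq (cells : List String) (b : Int) :
    (PySem.List.enumerate cells b).filterMap
      (fun p => if PySem.Str.strip p.2 ≠ "" then some (p.1, PySem.Str.strip p.2) else none)
    = pvAnchorsR cells b := by
  induction cells generalizing b with
  | nil => simp [PySem.List.enumerate_nil, pvAnchorsR]
  | cons c cs ih =>
    rw [PySem.List.enumerate_cons, List.filterMap_cons, ih (b + 1)]
    by_cases h : PySem.Str.strip c ≠ ""
    · simp [pvAnchorsR, h]
    · simp [pvAnchorsR, h]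

theorem pvAnchors_lb (cells : List String) (b : Int) :
    ∀ p ∈ pvAnchorsR cells b, b ≤ p.1 := by
  induction cells generalizing b with
  | nil => simp [pvAnchorsR]
  | cons c cs ih =>
    intro p hp
    unfold pvAnchorsR at hp
    split at hp
    · rcases List.mem_cons.1 hp with h | h
      · simp [h]
      · have := ih (b + 1) p h; omega
    · have := ih (b + 1) p hp; omega

theorem pvAnchors_pairwise (cells : List String) (b : Int) :
    (pvAnchorsR cells b).Pairwise (fun p q => p.1 < q.1) := by
  induction cells generalizing b with
  | nil => simp [pvAnchorsR]
  | cons c cs ih =>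
    unfold pvAnchorsR
    split
    · exact List.Pairwise.cons (fun q hq => by have := pvAnchors_lb cs (b + 1) q hq; omega) (ih (b + 1))
    · exact ih (b + 1)

theorem pvContains_false (d : PySem.Dict Int String) (k : Int)
    (h : ∀ p ∈ d.items, p.1 < k) : d.contains k = false := by
  by_contra hc
  have hk : k ∈ d.keys := (PySem.Dict.contains_iff_mem_keys d k).1 (by
    cases hck : d.contains k
    · exact absurd hck hc
    · rfl)
  have : d.keys = d.items.map (·.1) := rfl
  rw [this] at hk
  obtain ⟨p, hp, hpk⟩ := List.mem_map.1 hk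
  have := h p hp
  omega

-- inner fill loop: inserting range(a, stop) into a dict whose keys are all < a appends, in order
theorem pvRangeInsert (n : Nat) (a stop : Int) (s : String) (d : PySem.Dict Int String)
    (hn : (stop - a).toNat = n) (hd : ∀ p ∈ d.items, p.1 < a) :
    ((PySem.List.pyRange a stop 1).foldl (fun d j => d.insert j s) d).items
      = d.items ++ (PySem.List.pyRange a stop 1).map (fun j => (j, s))
    ∧ ∀ p ∈ ((PySem.List.pyRange a stop 1).foldl (fun d j => d.insert j s) d).items,
        p.1 < max a stop := by
  induction n generalizing a d with
  | zero =>
    have hle : stop ≤ a := by omega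
    rw [PySem.List.pyRange_one_eq_nil hle]
    exact ⟨by simp, fun p hp => lt_max_iff.mpr (Or.inl (hd p hp))⟩
  | succ m ih =>
    have hlt : a < stop := by omega
    rw [PySem.List.pyRange_one_cons hlt]
    simp only [List.foldl_cons, List.map_cons]
    have hins : (d.insert a s).items = d.items ++ [(a, s)] :=
      PySem.Dict.items_insert_of_not_contains d s (pvContains_false d a hd)
    have hd' : ∀ p ∈ (d.insert a s).items, p.1 < a + 1 := by
      intro p hp
      rw [hins] at hp
      rcases List.mem_append.1 hp with h | h
      · have := hd p h; omega
      · rw [List.mem_singleton] at h; subst h; exact lt_add_one a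
    obtain ⟨h1, h2⟩ := ih (a + 1) (d.insert a s) (by omega) hd'
    refine ⟨by rw [h1, hins]; simp, ?_⟩
    intro p hp
    have hpm := h2 p hp
    rw [max_eq_right (by omega : a + 1 ≤ stop)] at hpm
    rw [max_eq_right hlt.le]
    exact hpm

-- A's forward-fill loop, started at column b with carried street `cur` and accumulated dict d,
-- produces d's items followed by the fill of (virtual anchor (b, cur) if cur ≠ "") :: anchors
theorem pvAloop (cells : List String) (b : Int) (cur : String) (d : PySem.Dict Int String)
    (hd : ∀ p ∈ d.items, p.1 < b) :
    (((PySem.List.enumerate cells b).foldl pvStepA (cur, d)).2).items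
      = d.items ++ pvFill ((if cur ≠ "" then [(b, cur)] else []) ++ pvAnchorsR cells b)
                          (b + (cells.length : Int)) := by
  induction cells generalizing b cur d with
  | nil =>
    by_cases hc : cur ≠ "" <;>
      simp [PySem.List.enumerate_nil, pvAnchorsR, pvFill, pvStop, hc,
            PySem.List.pyRange_one_eq_nil (le_refl b)]
  | cons c cs ih =>
    rw [PySem.List.enumerate_cons]
    simp only [List.foldl_cons, List.length_cons, Nat.cast_add, Nat.cast_one]
    have hN : b + ((cs.length : Int) + 1) = b + 1 + (cs.length : Int) := by ring
    rw [hN]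
    have hbs : b < pvStop (pvAnchorsR cs (b + 1)) (b + 1 + (cs.length : Int)) := by
      cases hA : pvAnchorsR cs (b + 1) with
      | nil => simp [pvStop]; omega
      | cons q rest =>
        have : b + 1 ≤ q.1 := pvAnchors_lb cs (b + 1) q (by rw [hA]; exact List.mem_cons_self ..)
        simp [pvStop]; omega
    by_cases hs : PySem.Str.strip c ≠ ""
    · have hanch : pvAnchorsR (c :: cs) b = (b, PySem.Str.strip c) :: pvAnchorsR cs (b + 1) := by
        simp [pvAnchorsR, hs]
      have hstep : pvStepA (cur, d) (b, c) = (PySem.Str.strip c, d.insert b (PySem.Str.strip c)) := by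
        simp [pvStepA, hs]
      rw [hstep]
      have hins : (d.insert b (PySem.Str.strip c)).items = d.items ++ [(b, PySem.Str.strip c)] :=
        PySem.Dict.items_insert_of_not_contains d _ (pvContains_false d b hd)
      have hd' : ∀ p ∈ (d.insert b (PySem.Str.strip c)).items, p.1 < b + 1 := by
        intro p hp; rw [hins] at hp
        rcases List.mem_append.1 hp with h | h
        · have := hd p h; omega
        · rw [List.mem_singleton] at h; subst h; exact lt_add_one b
      rw [ih (b + 1) _ _ hd', hins, hanch, if_pos hs]
      by_cases hc : cur ≠ ""
      · rw [if_pos hc]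
        simp only [List.singleton_append]
        rw [pvFill_dup, pvFill_shift b (PySem.Str.strip c) _ _ hbs]
        simp
      · rw [if_neg hc]
        simp only [List.singleton_append, List.nil_append]
        rw [pvFill_shift b (PySem.Str.strip c) _ _ hbs]
        simp
    · have hs' : PySem.Str.strip c = "" := by simpa using hs
      have hanch : pvAnchorsR (c :: cs) b = pvAnchorsR cs (b + 1) := by
        simp [pvAnchorsR, hs']
      by_cases hc : cur ≠ ""
      · have hstep : pvStepA (cur, d) (b, c) = (cur, d.insert b cur) := by
          simp [pvStepA, hs', hc]
        rw [hstep]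
        have hins : (d.insert b cur).items = d.items ++ [(b, cur)] :=
          PySem.Dict.items_insert_of_not_contains d _ (pvContains_false d b hd)
        have hd' : ∀ p ∈ (d.insert b cur).items, p.1 < b + 1 := by
          intro p hp; rw [hins] at hp
          rcases List.mem_append.1 hp with h | h
          · have := hd p h; omega
          · rw [List.mem_singleton] at h; subst h; exact lt_add_one b
        rw [ih (b + 1) _ _ hd', hins, hanch, if_pos hc, if_pos hc]
        simp only [List.singleton_append]
        rw [pvFill_shift b cur _ _ hbs]
        simp
      · have hc' : cur = "" := by simpa using hc
        have hstep : pvStepA (cur, d) (b, c) = (cur, d) := by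
          simp [pvStepA, hs', hc']
        rw [hstep, ih (b + 1) _ _ (fun p hp => by have := hd p hp; omega), hanch,
            if_neg hc, if_neg hc]

-- B's zip loop over a strictly increasing anchor list fills each span in order
theorem pvBloop (A : List (Int × String)) (N : Int) (d : PySem.Dict Int String)
    (hA : A.Pairwise (fun p q => p.1 < q.1))
    (hd : ∀ p ∈ d.items, ∀ q ∈ A, p.1 < q.1) :
    ((A.zip ((A.drop 1).map (·.1) ++ [N])).foldl pvStepB d).items = d.items ++ pvFill A N := by
  induction A generalizing d with
  | nil => simp [pvFill]
  | cons a A' ih =>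
    obtain ⟨i, s⟩ := a
    have hd0 : ∀ p ∈ d.items, p.1 < i := fun p hp => hd p hp (i, s) (List.mem_cons_self ..)
    cases A' with
    | nil =>
      simp only [List.drop_succ_cons, List.drop_zero, List.map_nil, List.nil_append,
        List.zip_cons_cons, List.zip_nil_right, List.foldl_cons, List.foldl_nil]
      obtain ⟨h1, _⟩ := pvRangeInsert (N - i).toNat i N s d rfl hd0
      simpa [pvStepB, pvFill, pvStop] using h1
    | cons q rest =>
      obtain ⟨j, t⟩ := q
      have hij : i < j := (List.pairwise_cons.1 hA).1 (j, t) (List.mem_cons_self ..)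
      simp only [List.drop_succ_cons, List.drop_zero, List.map_cons, List.cons_append,
        List.zip_cons_cons, List.foldl_cons]
      obtain ⟨h1, h2⟩ := pvRangeInsert (j - i).toNat i j s d rfl hd0
      have hA' := (List.pairwise_cons.1 hA).2
      have hd' : ∀ p ∈ (pvStepB d ((i, s), j)).items, ∀ q' ∈ (j, t) :: rest, p.1 < q'.1 := by
        intro p hp q' hq'
        have hpm := h2 p (by simpa [pvStepB] using hp)
        rw [max_eq_right hij.le] at hpm
        rcases List.mem_cons.1 hq' with h | h
        · simp [h]; omega
        · have := (List.pairwise_cons.1 hA').1 q' h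
          omega
      have hrec := ih (pvStepB d ((i, s), j)) hA' hd'
      rw [List.drop_succ_cons, List.drop_zero] at hrec
      rw [hrec]
      have hitems : (pvStepB d ((i, s), j)).items
          = d.items ++ (PySem.List.pyRange i j 1).map (fun k => (k, s)) := by
        simpa [pvStepB] using h1
      rw [hitems, pvFill_cons i s ((j, t) :: rest) N]
      have hstop : pvStop ((j, t) :: rest) N = j := rfl
      rw [hstop]
      simp [List.append_assoc]

-- ===== VERDICT (by name: the statement is the Claim_ definition above) =====
theorem build_location_mapping_py_spec : Claim_equal_build_location_mapping_py := by
  intro rows street_row_idx house_row_idx _ _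
  unfold Spec_build_location_mapping_py build_location_mapping_py build_location_mapping_py_alt
  cases street_row_idx with
  | none => rfl
  | some i =>
    simp only
    set row := (PySem.List.pyGet? rows i).getD [] with hrow
    rw [pvAnchors_eq row 0]
    have hA := pvAloop row 0 "" PySem.Dict.empty (by simp [PySem.Dict.empty])
    have hB := pvBloop (pvAnchorsR row 0) (row.length : Int) PySem.Dict.empty
      (pvAnchors_pairwise row 0) (by simp [PySem.Dict.empty])
    simp only [ne_eq, not_true_eq_false, if_false, List.nil_append, zero_add] at hA
    rw [hA, hB]
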